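-- pv_equiv track=rewrite | github.com/bkmd11/password_hacker | word_list_generator/user_swap.py | main_user_swap
-- ===== SOURCE A (Python) =====
-- def user_swap(word):
--     swap_list = []
--     for letter in word:
--         new_letter = letter.swapcase()
--         new_word = word.replace(letter, new_letter)
--         swap_list.append(new_word)
--
--     return swap_list
--
-- def swap_for_word_in_list(swap_list):
--     big_list = []
--     for word in swap_list:
--         big_list += user_swap(word)
--
--     return big_list
--
-- def main_user_swap(word_list):
--     main_list = []
--     count = 0
--     while count <= len(word_list):
--         main_list += swap_for_word_in_list(word_list)
--         main_list = list(dict.fromkeys(main_list))    # This takes out doubles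
--         word_list = main_list
--         count += 1
--
--     return main_list
-- ===== SOURCE B (Python) =====
-- def main_user_swap(word_list):
--     # BFS worklist to the fixpoint: A's counted loop always runs until the set of
--     # swapcase variants is closed, so no counter is needed at all.
--     out = []
--     seen = set()
--     frontier = word_list
--     while frontier:
--         batch = []
--         for w in frontier:
--             for c in w:
--                 v = w.replace(c, c.swapcase())
--                 if v not in seen:
--                     seen.add(v)
--                     batch.append(v)
--         out.extend(batch)
--         frontier = batch
--     return out
-- ===== Notes on version B (the rewrite author's own statement) =====
-- stated objective: faster
-- what changed: A runs a counted while-loop that each round re-generates the swapcase variants of the ENTIRE accumulated list and re-deduplicates it with dict.fromkeys; B drops the counter entirely and runs a BFS worklist (frontier of newly added words + a seen set) straight to the fixpoint, expanding each word exactly once -- correct because A's count<=len(main_list) bound provably always lets the loop reach the full closure.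
import Mathlib
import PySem

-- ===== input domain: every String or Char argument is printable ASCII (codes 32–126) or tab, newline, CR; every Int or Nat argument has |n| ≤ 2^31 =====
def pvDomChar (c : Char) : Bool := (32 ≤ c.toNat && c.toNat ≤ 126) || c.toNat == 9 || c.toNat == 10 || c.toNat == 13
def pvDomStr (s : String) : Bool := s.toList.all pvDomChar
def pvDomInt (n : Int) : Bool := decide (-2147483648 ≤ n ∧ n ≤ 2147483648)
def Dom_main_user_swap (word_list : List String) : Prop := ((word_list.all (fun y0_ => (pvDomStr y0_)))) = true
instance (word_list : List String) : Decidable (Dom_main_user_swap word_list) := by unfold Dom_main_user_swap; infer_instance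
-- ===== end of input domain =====

-- B drops A's counter and repeated full rescans/re-dedups of the accumulated list and instead
-- runs a BFS worklist (frontier + seen set) straight to the fixpoint, expanding each word once;
-- A's count ≤ len(main_list) bound provably always reaches that same closure (faster).

-- letter.swapcase() for a single character (exact on the ASCII domain Dom_ admits)
def swapChar (c : Char) : Char :=
  if 97 ≤ c.toNat ∧ c.toNat ≤ 122 then Char.ofNat (c.toNat - 32)
  else if 65 ≤ c.toNat ∧ c.toNat ≤ 90 then Char.ofNat (c.toNat + 32)
  else c

-- word.replace(letter, letter.swapcase()): the pattern is a single character, so Python's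
-- replace is exactly a character-wise map (hand port, exact)
def swapWordS (word : String) (letter : Char) : String :=
  String.ofList (word.toList.map (fun x => if x = letter then swapChar letter else x))

-- ===== PORT A =====
def user_swapP (word : String) : List String :=
  word.toList.foldl (fun swap_list letter => swap_list ++ [swapWordS word letter]) []

def swap_for_word_in_listP (swap_list : List String) : List String :=
  swap_list.foldl (fun big_list word => big_list ++ user_swapP word) []

-- all swapcase variants produced from one word / from a list of words (specification form of the
-- same loops; used by the termination/invariant proofs both ports carry)
def variantsOf (w : String) : List String := w.toList.map (fun c => swapWordS w c)

def variants (l : List String) : List String := l.flatMap variantsOf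

theorem user_swapP_eq (w : String) : user_swapP w = variantsOf w := by
  unfold user_swapP variantsOf
  rw [PySem.List.foldl_append_singleton_eq_map]
  simp

theorem swapP_eq (l : List String) : swap_for_word_in_listP l = variants l := by
  unfold swap_for_word_in_listP variants
  rw [PySem.List.foldl_append_eq_flatMap, funext user_swapP_eq]
  simp

-- the finite universe of words reachable by letter-swaps: per-position case choices
def choices : List Char → List (List Char)
  | [] => [[]]
  | c :: cs => (choices cs).flatMap (fun t => [c :: t, swapChar c :: t])

def pvV (word_list : List String) : List String :=
  word_list.flatMap (fun u => (choices u.toList).map (fun l => String.ofList l))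

theorem char_toNat_lt (c : Char) : c.toNat < 1114112 := by
  have h := c.valid
  unfold UInt32.isValidChar Nat.isValidChar at h
  have e : c.toNat = c.val.toNat := rfl
  rcases h with h | ⟨h1, h2⟩ <;> omega

theorem toNat_ofNat_small (m : Nat) (h : m < 55296) : (Char.ofNat m).toNat = m := by
  unfold Char.ofNat
  split
  · rfl
  · omega

theorem swapChar_swapChar (c : Char) : swapChar (swapChar c) = c := by
  have hc : c.toNat < 1114112 := char_toNat_lt c
  unfold swapChar
  split
  · next h =>
    rw [toNat_ofNat_small _ (by omega)]
    rw [if_neg (by omega), if_pos (by omega)]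
    have e : c.toNat - 32 + 32 = c.toNat := by omega
    rw [e, Char.ofNat_toNat]
  · next h =>
    split
    · next h2 =>
      rw [toNat_ofNat_small _ (by omega)]
      rw [if_pos (by omega)]
      have e : c.toNat + 32 - 32 = c.toNat := by omega
      rw [e, Char.ofNat_toNat]
    · rfl

theorem choices_closed {u l : List Char} (c : Char) (h : l ∈ choices u) :
    (l.map (fun x => if x = c then swapChar c else x)) ∈ choices u := by
  induction u generalizing l with
  | nil =>
    simp [choices] at h
    simp [h, choices]
  | cons a us ih =>
    simp only [choices, List.mem_flatMap] at h ⊢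
    obtain ⟨t, ht, hl⟩ := h
    refine ⟨t.map (fun x => if x = c then swapChar c else x), ih ht, ?_⟩
    have key : ∀ b : Char, (b = a ∨ b = swapChar a) →
        ((if b = c then swapChar c else b) = a ∨ (if b = c then swapChar c else b) = swapChar a) := by
      intro b hb
      by_cases hbc : b = c
      · subst hbc
        rw [if_pos rfl]
        rcases hb with hb | hb
        · subst hb; right; rfl
        · left; rw [hb, swapChar_swapChar]
      · rw [if_neg hbc]; exact hb
    simp only [List.mem_cons] at hl ⊢
    rcases hl with hl | hl | hfalse
    · subst hl
      rcases key a (Or.inl rfl) with hk | hk <;> simp [hk]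
    · subst hl
      rcases key (swapChar a) (Or.inr rfl) with hk | hk <;> simp [hk]
    · exact absurd hfalse (by simp)

theorem self_mem_choices (u : List Char) : u ∈ choices u := by
  induction u with
  | nil => simp [choices]
  | cons a us ih =>
    simp only [choices, List.mem_flatMap]
    exact ⟨us, ih, by simp⟩

theorem orig_sub_pvV (word_list : List String) : word_list ⊆ pvV word_list := by
  intro w hw
  simp only [pvV, List.mem_flatMap, List.mem_map]
  exact ⟨w, hw, w.toList, self_mem_choices _, by simp⟩

theorem pvV_closed (word_list : List String) :
    ∀ w ∈ pvV word_list, ∀ c : Char, swapWordS w c ∈ pvV word_list := by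
  intro w hw c
  simp only [pvV, List.mem_flatMap, List.mem_map] at hw ⊢
  obtain ⟨u, hu, l, hl, he⟩ := hw
  refine ⟨u, hu, l.map (fun x => if x = c then swapChar c else x), choices_closed c hl, ?_⟩
  rw [← he]
  simp [swapWordS]

theorem variants_sub {V l : List String}
    (hcl : ∀ w ∈ V, ∀ c : Char, swapWordS w c ∈ V) (hl : l ⊆ V) : variants l ⊆ V := by
  intro x hx
  simp only [variants, variantsOf, List.mem_flatMap, List.mem_map] at hx
  obtain ⟨w, hw, c, _, he⟩ := hx
  exact he ▸ hcl w (hl hw) c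

-- the elements of xs that are new w.r.t. seen, first occurrences only, in order (the canonical
-- "what this round appends" function both loops are reduced to)
def pvNew : List String → List String → List String
  | [], _ => []
  | x :: xs, s => if x ∈ s then pvNew xs s else x :: pvNew xs (s ++ [x])

theorem pvNew_append (xs ys : List String) :
    ∀ s, pvNew (xs ++ ys) s = pvNew xs s ++ pvNew ys (s ++ pvNew xs s) := by
  induction xs with
  | nil => intro s; simp [pvNew]
  | cons x xs ih =>
    intro s
    by_cases hx : x ∈ s
    · simp [pvNew, hx, ih]
    · simp only [List.cons_append, pvNew, if_neg hx, ih (s ++ [x])]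
      rw [← List.append_cons]

theorem pvNew_subset (xs : List String) : ∀ s, pvNew xs s ⊆ xs := by
  induction xs with
  | nil => intro s; simp [pvNew]
  | cons x xs ih =>
    intro s y hy
    rw [pvNew] at hy
    split at hy
    · exact List.mem_cons_of_mem _ (ih s hy)
    · rcases List.mem_cons.1 hy with h | h
      · exact h ▸ List.mem_cons_self
      · exact List.mem_cons_of_mem _ (ih (s ++ [x]) h)

theorem pvNew_nodup_append (xs : List String) :
    ∀ s : List String, s.Nodup → (s ++ pvNew xs s).Nodup := by
  induction xs with
  | nil => intro s hs; simpa [pvNew]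
  | cons x xs ih =>
    intro s hs
    by_cases hx : x ∈ s
    · simpa [pvNew, hx] using ih s hs
    · rw [pvNew, if_neg hx, List.append_cons (as := s) (b := x)]
      refine ih (s ++ [x]) (hs.append (List.nodup_singleton x) ?_)
      intro a ha hax
      rw [List.mem_singleton] at hax
      subst hax
      exact hx ha

-- port-cited lemmas: the subset/nodup/measure facts A's loop carries for termination
theorem dedup_sub {V wl main : List String}
    (hcl : ∀ w ∈ V, ∀ c : Char, swapWordS w c ∈ V) (hw : wl ⊆ V) (hm : main ⊆ V) :
    PySem.List.dedup (main ++ swap_for_word_in_listP wl) ⊆ V := by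
  intro x hx
  rcases List.mem_append.1 ((PySem.List.mem_dedup _ _).1 hx) with h | h
  · exact hm h
  · exact variants_sub hcl hw (swapP_eq wl ▸ h)

theorem loopA_dec (V wl : List String) (count : Nat)
    (hw : wl ⊆ V) (hn : count = 0 ∨ wl.Nodup) (hc : count ≤ wl.length) :
    V.dedup.length + 2 - (count + 1) < V.dedup.length + 2 - count := by
  rcases hn with h0 | hnd
  · omega
  · have hsub : wl ⊆ V.dedup := fun x hx => List.mem_dedup.2 (hw hx)
    have := (hnd.subperm hsub).length_le
    omega

-- A's while loop; the proof arguments only feed termination: count catches up with the length of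
-- the deduplicated list, which is bounded by the finite swap-closed universe V
def loopA (V : List String) (hcl : ∀ w ∈ V, ∀ c : Char, swapWordS w c ∈ V)
    (wl main : List String) (count : Nat)
    (hw : wl ⊆ V) (hm : main ⊆ V) (hn : count = 0 ∨ wl.Nodup) : List String :=
  if hc : count ≤ wl.length then
    loopA V hcl (PySem.List.dedup (main ++ swap_for_word_in_listP wl))
      (PySem.List.dedup (main ++ swap_for_word_in_listP wl)) (count + 1)
      (dedup_sub hcl hw hm) (dedup_sub hcl hw hm)
      (Or.inr (PySem.List.nodup_dedup _))
  else main
termination_by V.dedup.length + 2 - count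
decreasing_by exact loopA_dec V wl count hw hn hc

def main_user_swap (word_list : List String) : List String :=
  loopA (pvV word_list) (pvV_closed word_list) word_list [] 0
    (orig_sub_pvV word_list) (by simp) (Or.inl rfl)

-- ===== PORT B =====
-- one round of B's worklist: collect the unseen swapcase variants of the frontier words (batch)
-- while extending seen; transliterates the inner double for-loop of Source B
def stepB (frontier : List String) (seen : PySem.Set String) : List String × PySem.Set String :=
  frontier.foldl (fun q w =>
    w.toList.foldl (fun q c =>
      let v := swapWordS w c
      if v ∈ q.2 then q else (q.1 ++ [v], PySem.Set.add q.2 v)) q) ([], seen)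

theorem foldl_step_map {α : Type} (f : α → String) (xs : List α) :
    ∀ (acc seen : List String),
      xs.foldl (fun (q : List String × PySem.Set String) v =>
          if f v ∈ q.2 then q else (q.1 ++ [f v], PySem.Set.add q.2 (f v))) (acc, seen)
        = (acc ++ pvNew (xs.map f) seen, seen ++ pvNew (xs.map f) seen) := by
  induction xs with
  | nil => intro acc seen; simp [pvNew]
  | cons x xs ih =>
    intro acc seen
    by_cases hx : f x ∈ seen
    · simp only [List.foldl_cons, ih, List.map_cons, pvNew, if_pos hx]
    · simp only [List.foldl_cons, PySem.Set.add_of_not_mem hx,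
        ih (acc ++ [f x]) (seen ++ [f x]), List.map_cons, pvNew, if_neg hx]
      simp

theorem stepB_eq (frontier : List String) (seen : PySem.Set String) :
    stepB frontier seen =
      (pvNew (variants frontier) seen, seen ++ pvNew (variants frontier) seen) := by
  suffices h : ∀ (fr : List String) (acc seen : List String),
      fr.foldl (fun q w =>
        w.toList.foldl (fun (q : List String × PySem.Set String) c =>
          let v := swapWordS w c
          if v ∈ q.2 then q else (q.1 ++ [v], PySem.Set.add q.2 v)) q) (acc, seen)
      = (acc ++ pvNew (variants fr) seen, seen ++ pvNew (variants fr) seen) by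
    exact h frontier [] seen
  intro fr
  induction fr with
  | nil => intro acc seen; simp [variants, pvNew]
  | cons w fr ih =>
    intro acc seen
    simp only [List.foldl_cons]
    rw [show (w.toList.foldl (fun (q : List String × PySem.Set String) c =>
          let v := swapWordS w c
          if v ∈ q.2 then q else (q.1 ++ [v], PySem.Set.add q.2 v)) (acc, seen))
        = (acc ++ pvNew (variantsOf w) seen, seen ++ pvNew (variantsOf w) seen) from
      foldl_step_map (swapWordS w) w.toList acc seen]
    rw [ih]
    have hv : variants (w :: fr) = variantsOf w ++ variants fr := by simp [variants]
    rw [hv, pvNew_append]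
    simp [List.append_assoc]

-- port-cited lemmas: the subset/nodup/measure facts B's worklist carries for termination
theorem stepB_sub2 {V frontier seen : List String}
    (hcl : ∀ w ∈ V, ∀ c : Char, swapWordS w c ∈ V) (hse : seen ⊆ V) (hf : frontier ⊆ V) :
    (stepB frontier seen).2 ⊆ V := by
  rw [stepB_eq]
  intro x hx
  rcases List.mem_append.1 hx with h | h
  · exact hse h
  · exact variants_sub hcl hf (pvNew_subset _ _ h)

theorem stepB_nodup {frontier seen : List String} (hnd : seen.Nodup) :
    (stepB frontier seen).2.Nodup := by
  rw [stepB_eq]; exact pvNew_nodup_append _ _ hnd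

theorem stepB_sub1 {V frontier seen : List String}
    (hcl : ∀ w ∈ V, ∀ c : Char, swapWordS w c ∈ V) (hf : frontier ⊆ V) :
    (stepB frontier seen).1 ⊆ V := by
  rw [stepB_eq]
  intro x hx
  exact variants_sub hcl hf (pvNew_subset _ _ hx)

theorem bfsB_dec (V frontier seen : List String)
    (hse : seen ⊆ V) (hnd : seen.Nodup) (hfe : ¬ frontier = []) :
    (V.dedup.length + 1 - (stepB frontier seen).2.length) * 2
        + (if (stepB frontier seen).1 = [] then 0 else 1)
      < (V.dedup.length + 1 - seen.length) * 2 + (if frontier = [] then 0 else 1) := by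
  have hlen : seen.length ≤ V.dedup.length :=
    (hnd.subperm (fun x hx => List.mem_dedup.2 (hse hx))).length_le
  rw [stepB_eq]
  by_cases hb : pvNew (variants frontier) seen = []
  · simp [hb, hfe]
  · have hlen2 : (seen ++ pvNew (variants frontier) seen).length ≥ seen.length + 1 := by
      rw [List.length_append]
      have : (pvNew (variants frontier) seen).length ≥ 1 :=
        Nat.one_le_iff_ne_zero.2 (by simpa [List.length_eq_zero_iff] using hb)
      omega
    have hle : (if pvNew (variants frontier) seen = [] then 0 else 1) ≤ 1 := by
      split <;> omega
    simp only [if_neg hfe]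
    omega

-- B's worklist loop: no counter — run until the frontier is empty (the fixpoint). The proof
-- arguments only feed termination: seen grows inside the finite universe V, or frontier dies.
def bfsB (V : List String) (hcl : ∀ w ∈ V, ∀ c : Char, swapWordS w c ∈ V)
    (out frontier : List String) (seen : PySem.Set String)
    (hse : seen ⊆ V) (hnd : seen.Nodup) (hf : frontier ⊆ V) : List String :=
  if hfe : frontier = [] then out
  else
    bfsB V hcl (out ++ (stepB frontier seen).1) (stepB frontier seen).1 (stepB frontier seen).2
      (stepB_sub2 hcl hse hf) (stepB_nodup hnd) (stepB_sub1 hcl hf)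
termination_by (V.dedup.length + 1 - seen.length) * 2 + (if frontier = [] then 0 else 1)
decreasing_by exact bfsB_dec V frontier seen hse hnd hfe

def main_user_swap_alt (word_list : List String) : List String :=
  bfsB (pvV word_list) (pvV_closed word_list) [] word_list []
    (by simp) List.nodup_nil (orig_sub_pvV word_list)

-- ===== PRECONDITION & SPEC =====
def Spec_main_user_swap (word_list : List String) (out : List String) : Prop := out = main_user_swap_alt word_list
instance (word_list : List String) (out : List String) : Decidable (Spec_main_user_swap word_list out) := by unfold Spec_main_user_swap; infer_instance

-- ===== CLAIM (what is proved, stated in full; the proofs are below) =====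
def Claim_equal_main_user_swap : Prop := ∀ (word_list : List String), Dom_main_user_swap word_list → Spec_main_user_swap word_list (main_user_swap word_list)

-- ===== LEMMAS AND PROOFS =====

theorem mem_append_pvNew {y : String} (xs : List String) :
    ∀ s, y ∈ s ++ pvNew xs s ↔ y ∈ s ∨ y ∈ xs := by
  induction xs with
  | nil => intro s; simp [pvNew]
  | cons x xs ih =>
    intro s
    by_cases hx : x ∈ s
    · simp only [pvNew, if_pos hx, ih s, List.mem_cons]
      constructor
      · rintro (h | h) <;> tauto
      · rintro (h | h | h) <;> first | tauto | (subst h; tauto)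
    · rw [pvNew, if_neg hx, List.append_cons (as := s) (b := x), ih (s ++ [x])]
      simp only [List.mem_append, List.mem_cons]
      tauto

theorem pvNew_nil_of_subset {xs s : List String} (h : ∀ x ∈ xs, x ∈ s) : pvNew xs s = [] := by
  induction xs with
  | nil => rfl
  | cons x xs ih =>
    rw [pvNew, if_pos (h x List.mem_cons_self)]
    exact ih (fun y hy => h y (List.mem_cons_of_mem _ hy))

theorem set_update_eq (xs : List String) :
    ∀ s, PySem.Set.update s xs = s ++ pvNew xs s := by
  induction xs with
  | nil => intro s; simp [PySem.Set.update_nil, pvNew]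
  | cons x xs ih =>
    intro s
    rw [PySem.Set.update_cons, PySem.Set.add_eq_ite]
    by_cases hx : x ∈ s
    · rw [if_pos hx, ih s, pvNew, if_pos hx]
    · rw [if_neg hx, ih (s ++ [x]), pvNew, if_neg hx]
      simp

theorem dedup_append_nodup {s : List String} (hs : s.Nodup) (xs : List String) :
    PySem.List.dedup (s ++ xs) = s ++ pvNew xs s := by
  rw [PySem.List.dedup_eq_ofList, PySem.Set.ofList_append,
    PySem.Set.ofList_eq_self_of_nodup s hs, set_update_eq]

theorem loopA_congr (V : List String) (hcl : ∀ w ∈ V, ∀ c : Char, swapWordS w c ∈ V)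
    {wl wl' main main' : List String} {count : Nat}
    (e1 : wl = wl') (e2 : main = main')
    (hw : wl ⊆ V) (hm : main ⊆ V) (hn : count = 0 ∨ wl.Nodup)
    (hw' : wl' ⊆ V) (hm' : main' ⊆ V) (hn' : count = 0 ∨ wl'.Nodup) :
    loopA V hcl wl main count hw hm hn = loopA V hcl wl' main' count hw' hm' hn' := by
  subst e1; subst e2; rfl

theorem bfsB_congr (V : List String) (hcl : ∀ w ∈ V, ∀ c : Char, swapWordS w c ∈ V)
    {out out' frontier frontier' seen seen' : List String}
    (e1 : out = out') (e2 : frontier = frontier') (e3 : seen = seen')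
    (hse : seen ⊆ V) (hnd : seen.Nodup) (hf : frontier ⊆ V)
    (hse' : seen' ⊆ V) (hnd' : seen'.Nodup) (hf' : frontier' ⊆ V) :
    bfsB V hcl out frontier seen hse hnd hf = bfsB V hcl out' frontier' seen' hse' hnd' hf' := by
  subst e1; subst e2; subst e3; rfl

-- once main is swap-closed, every remaining round of A is a no-op: the loop just counts up
theorem loopA_closed (V : List String) (hcl : ∀ w ∈ V, ∀ c : Char, swapWordS w c ∈ V) :
    ∀ (k count : Nat) (m : List String),
      V.dedup.length + 2 - count ≤ k → m.Nodup → (∀ x ∈ variants m, x ∈ m) →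
      ∀ (hw : m ⊆ V) (hm : m ⊆ V) (hn : count = 0 ∨ m.Nodup),
      loopA V hcl m m count hw hm hn = m := by
  intro k
  induction k with
  | zero =>
    intro count m hk hnd hclosed hw hm hn
    have hmlen : m.length ≤ V.dedup.length :=
      (hnd.subperm (fun x hx => List.mem_dedup.2 (hm hx))).length_le
    rw [loopA, dif_neg (by omega : ¬ count ≤ m.length)]
  | succ k ih =>
    intro count m hk hnd hclosed hw hm hn
    by_cases hc : count ≤ m.length
    · rw [loopA, dif_pos hc]
      have hA : PySem.List.dedup (m ++ swap_for_word_in_listP m) = m := by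
        rw [swapP_eq, dedup_append_nodup hnd, pvNew_nil_of_subset hclosed, List.append_nil]
      refine (loopA_congr V hcl hA hA _ _ _ hw hm (Or.inr hnd)).trans ?_
      exact ih (count + 1) m (by omega) hnd hclosed hw hm (Or.inr hnd)
    · rw [loopA, dif_neg hc]

-- the correspondence: A's counted loop over the whole list = B's worklist loop, given the
-- invariant m = pre ++ frontier with variants(pre) already in m and count ≤ |m| while the
-- frontier is alive
theorem loop_eq (V : List String) (hcl : ∀ w ∈ V, ∀ c : Char, swapWordS w c ∈ V) :
    ∀ (k count : Nat) (m pre frontier : List String),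
      V.dedup.length + 2 - count ≤ k → 1 ≤ count →
      m = pre ++ frontier → (∀ x ∈ variants pre, x ∈ m) →
      (frontier ≠ [] → count ≤ m.length) →
      ∀ (hw : m ⊆ V) (hm : m ⊆ V) (hn : count = 0 ∨ m.Nodup) (hnd : m.Nodup)
        (hse : m ⊆ V) (hf : frontier ⊆ V),
      loopA V hcl m m count hw hm hn = bfsB V hcl m frontier m hse hnd hf := by
  intro k
  induction k with
  | zero =>
    intro count m pre frontier hk h1 hsplit hclosed hcnt hw hm hn hnd hse hf
    have hmlen : m.length ≤ V.dedup.length :=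
      (hnd.subperm (fun x hx => List.mem_dedup.2 (hm hx))).length_le
    by_cases hfe : frontier = []
    · rw [bfsB, dif_pos hfe]
      subst hfe
      rw [List.append_nil] at hsplit
      subst hsplit
      exact loopA_closed V hcl 0 count m hk hnd hclosed hw hm hn
    · exact absurd (hcnt hfe) (by omega)
  | succ k ih =>
    intro count m pre frontier hk h1 hsplit hclosed hcnt hw hm hn hnd hse hf
    by_cases hfe : frontier = []
    · rw [bfsB, dif_pos hfe]
      subst hfe
      rw [List.append_nil] at hsplit
      subst hsplit
      exact loopA_closed V hcl (k + 1) count m hk hnd hclosed hw hm hn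
    · have hc : count ≤ m.length := hcnt hfe
      subst hsplit
      rw [loopA, bfsB, dif_pos hc, dif_neg hfe]
      have hvar : variants (pre ++ frontier) = variants pre ++ variants frontier := by
        simp [variants]
      have hA : PySem.List.dedup ((pre ++ frontier) ++ swap_for_word_in_listP (pre ++ frontier))
          = (pre ++ frontier) ++ pvNew (variants frontier) (pre ++ frontier) := by
        rw [swapP_eq, dedup_append_nodup hnd]
        congr 1
        rw [hvar, pvNew_append, pvNew_nil_of_subset hclosed]
        simp
      have hB1 : (stepB frontier (pre ++ frontier)).1
          = pvNew (variants frontier) (pre ++ frontier) := by rw [stepB_eq]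
      have hB2 : (stepB frontier (pre ++ frontier)).2
          = (pre ++ frontier) ++ pvNew (variants frontier) (pre ++ frontier) := by rw [stepB_eq]
      have hBsub : pvNew (variants frontier) (pre ++ frontier) ⊆ V :=
        fun x hx => variants_sub hcl hf (pvNew_subset _ _ hx)
      have hm' : (pre ++ frontier) ++ pvNew (variants frontier) (pre ++ frontier) ⊆ V := by
        intro x hx
        rcases List.mem_append.1 hx with h | h
        · exact hm h
        · exact hBsub h
      have hnd' : ((pre ++ frontier) ++ pvNew (variants frontier) (pre ++ frontier)).Nodup :=
        pvNew_nodup_append _ _ hnd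
      have hclosed' : ∀ x ∈ variants (pre ++ frontier),
          x ∈ (pre ++ frontier) ++ pvNew (variants frontier) (pre ++ frontier) := by
        intro x hx
        rw [hvar] at hx
        rcases List.mem_append.1 hx with h | h
        · exact List.mem_append_left _ (hclosed x h)
        · exact (mem_append_pvNew (variants frontier) (pre ++ frontier)).2 (Or.inr h)
      have hcnt' : pvNew (variants frontier) (pre ++ frontier) ≠ [] →
          count + 1 ≤ ((pre ++ frontier) ++ pvNew (variants frontier) (pre ++ frontier)).length := by
        intro hb
        rw [List.length_append]
        have : (pvNew (variants frontier) (pre ++ frontier)).length ≥ 1 :=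
          Nat.one_le_iff_ne_zero.2 (by simpa [List.length_eq_zero_iff] using hb)
        omega
      refine (loopA_congr V hcl hA hA _ _ _ hm' hm' (Or.inr hnd')).trans ?_
      refine Eq.trans (ih (count + 1) _ (pre ++ frontier)
        (pvNew (variants frontier) (pre ++ frontier)) (by omega) (by omega) rfl hclosed'
        hcnt' hm' hm' (Or.inr hnd') hnd' hm' hBsub) ?_
      exact bfsB_congr V hcl
        ((by rw [hB1]) : (pre ++ frontier) ++ pvNew (variants frontier) (pre ++ frontier)
          = (pre ++ frontier) ++ (stepB frontier (pre ++ frontier)).1)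
        hB1.symm hB2.symm hm' hnd' hBsub
        (by rw [hB2]; exact hm') (by rw [hB2]; exact hnd') (by rw [hB1]; exact hBsub)

theorem first_round (word_list : List String) :
    main_user_swap word_list = main_user_swap_alt word_list := by
  unfold main_user_swap main_user_swap_alt
  have hA : PySem.List.dedup ([] ++ swap_for_word_in_listP word_list)
      = pvNew (variants word_list) [] := by
    rw [swapP_eq, dedup_append_nodup List.nodup_nil]
    simp
  by_cases hwe : word_list = []
  · subst hwe
    rw [loopA, dif_pos (Nat.zero_le _), bfsB, dif_pos rfl]
    have h0 : PySem.List.dedup (([] : List String) ++ swap_for_word_in_listP []) = [] := by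
      simpa [variants] using hA
    refine (loopA_congr _ (pvV_closed []) h0 h0 _ _ _ (by simp) (by simp)
      (Or.inr List.nodup_nil)).trans ?_
    rw [loopA, dif_neg (by simp : ¬ 1 ≤ ([] : List String).length)]
  · rw [loopA, dif_pos (Nat.zero_le _), bfsB, dif_neg hwe]
    have hB1 : (stepB word_list []).1 = pvNew (variants word_list) [] := by rw [stepB_eq]
    have hB2 : (stepB word_list []).2 = pvNew (variants word_list) [] := by
      rw [stepB_eq]; simp
    have hsub : pvNew (variants word_list) [] ⊆ pvV word_list :=
      fun x hx => variants_sub (pvV_closed word_list) (orig_sub_pvV word_list)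
        (pvNew_subset _ _ hx)
    have hnd : (pvNew (variants word_list) []).Nodup := by
      have h := pvNew_nodup_append (variants word_list) [] List.nodup_nil
      simpa using h
    have hcnt : pvNew (variants word_list) [] ≠ [] →
        1 ≤ (pvNew (variants word_list) []).length := by
      intro hb
      exact Nat.one_le_iff_ne_zero.2 (by simpa [List.length_eq_zero_iff] using hb)
    refine (loopA_congr _ (pvV_closed word_list) hA hA _ _ _ hsub hsub (Or.inr hnd)).trans ?_
    refine Eq.trans (loop_eq (pvV word_list) (pvV_closed word_list)
      ((pvV word_list).dedup.length + 2) 1 (pvNew (variants word_list) []) []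
      (pvNew (variants word_list) []) (by omega) le_rfl rfl (by simp [variants]) hcnt
      hsub hsub (Or.inr hnd) hnd hsub hsub) ?_
    exact bfsB_congr _ (pvV_closed word_list)
      ((by rw [hB1]; simp) : pvNew (variants word_list) []
        = [] ++ (stepB word_list []).1)
      hB1.symm hB2.symm hsub hnd hsub
      (by rw [hB2]; exact hsub) (by rw [hB2]; exact hnd) (by rw [hB1]; exact hsub)

-- ===== VERDICT (by name: the statement is the Claim_ definition above) =====
theorem main_user_swap_spec : Claim_equal_main_user_swap := by
  intro word_list _dom
  unfold Spec_main_user_swap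
  exact first_round word_list
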